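-- pv_equiv track=rewrite | github.com/ViniciusAPaccola/BlackJack-Simulator | BlackJack.py | verificar_vencedores
-- ===== SOURCE A (Python) =====
-- def verificar_vencedores(pontuacoes):
--     vencedores = []
--     maior_pontuacao = 0
--     for jogador, pontuacao in pontuacoes.items():
--         # Testa se a pontuação é <= 21 e maior que 0 e define a maior pontuação
--         if pontuacao <= 21 and pontuacao > maior_pontuacao:
--             maior_pontuacao = pontuacao
--             vencedores = [jogador]
--         # Testa se a pontuação é igual a maior pontuação (caso de haver mais de 1 ganhador)
--         elif pontuacao == maior_pontuacao:
--             vencedores.append(jogador)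
--     return vencedores
-- ===== SOURCE B (Python) =====
-- def verificar_vencedores(pontuacoes):
--     validas = [p for p in pontuacoes.values() if 0 < p <= 21]
--     alvo = max(validas) if validas else 0
--     return [j for j, p in pontuacoes.items() if p == alvo]
-- ===== Notes on version B (the rewrite author's own statement) =====
-- stated objective: simpler
-- what changed: Replaces A's single running-max-with-reset loop over dict items by a compute-then-filter decomposition: collect valid scores (0 < p <= 21), take their max (default 0) as the target, then filter the players whose score equals the target.
import Mathlib
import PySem

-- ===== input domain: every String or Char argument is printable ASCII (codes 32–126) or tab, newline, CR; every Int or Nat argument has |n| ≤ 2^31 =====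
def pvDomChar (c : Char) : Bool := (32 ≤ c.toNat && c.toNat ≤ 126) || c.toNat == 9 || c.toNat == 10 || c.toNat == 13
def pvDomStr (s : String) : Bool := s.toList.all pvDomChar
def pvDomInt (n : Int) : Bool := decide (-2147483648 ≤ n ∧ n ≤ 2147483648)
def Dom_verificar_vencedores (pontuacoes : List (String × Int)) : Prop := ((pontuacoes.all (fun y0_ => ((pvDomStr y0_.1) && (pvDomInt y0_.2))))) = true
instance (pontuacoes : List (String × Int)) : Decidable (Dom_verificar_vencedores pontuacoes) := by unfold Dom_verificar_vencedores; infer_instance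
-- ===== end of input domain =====

-- B replaces A's running-max-with-reset loop by a compute-target-then-filter decomposition (objective: simpler).

-- ===== PORT A =====
-- literal port of A: one fold carrying (vencedores, maior_pontuacao)
def verificar_vencedores (pontuacoes : List (String × Int)) : List String :=
  (pontuacoes.foldl
    (fun st jp =>
      if jp.2 ≤ 21 ∧ st.2 < jp.2 then ([jp.1], jp.2)
      else if jp.2 = st.2 then (st.1 ++ [jp.1], st.2)
      else st)
    (([] : List String), (0 : Int))).1

-- ===== PORT B =====
-- literal port of Source B: valid scores, target = max (default 0), then filter
def verificar_vencedores_alt (pontuacoes : List (String × Int)) : List String :=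
  let validas := (pontuacoes.map Prod.snd).filter (fun p => decide (0 < p) && decide (p ≤ 21))
  let alvo := (PySem.List.max? validas (fun y => y)).getD 0
  (pontuacoes.filter (fun jp => jp.2 == alvo)).map Prod.fst

-- ===== PRECONDITION & SPEC =====
def Spec_verificar_vencedores (pontuacoes : List (String × Int)) (out : List String) : Prop := out = verificar_vencedores_alt pontuacoes
instance (pontuacoes : List (String × Int)) (out : List String) : Decidable (Spec_verificar_vencedores pontuacoes out) := by unfold Spec_verificar_vencedores; infer_instance

-- ===== CLAIM (what is proved, stated in full; the proofs are below) =====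
def Claim_equal_verificar_vencedores : Prop := ∀ (pontuacoes : List (String × Int)), Dom_verificar_vencedores pontuacoes → Spec_verificar_vencedores pontuacoes (verificar_vencedores pontuacoes)

-- ===== LEMMAS AND PROOFS =====

-- the running maior_pontuacao of A's loop, started at m
def pvM (m : Int) (l : List (String × Int)) : Int :=
  l.foldl (fun acc jp => if jp.2 ≤ 21 ∧ acc < jp.2 then jp.2 else acc) m

theorem pvM_ge (l : List (String × Int)) (m : Int) : m ≤ pvM m l := by
  induction l generalizing m with
  | nil => simp [pvM]
  | cons jp rest ih =>
    simp only [pvM, List.foldl_cons] at *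
    split_ifs with h
    · exact le_trans (le_of_lt h.2) (ih jp.2)
    · exact ih m

theorem pvM_le21 (l : List (String × Int)) (m : Int) (hm : m ≤ 21) : pvM m l ≤ 21 := by
  induction l generalizing m with
  | nil => simpa [pvM]
  | cons jp rest ih =>
    simp only [pvM, List.foldl_cons] at *
    split_ifs with h
    · exact ih jp.2 h.1
    · exact ih m hm

-- characterisation of A's loop from an arbitrary state (v, m)
theorem pvLoop_char (l : List (String × Int)) (v : List String) (m : Int)
    (h0 : 0 ≤ m) (h21 : m ≤ 21) :
    (l.foldl
      (fun st jp =>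
        if jp.2 ≤ 21 ∧ st.2 < jp.2 then ([jp.1], jp.2)
        else if jp.2 = st.2 then (st.1 ++ [jp.1], st.2)
        else st)
      (v, m)).1
    = (if pvM m l = m then v else []) ++ (l.filter (fun jp => jp.2 == pvM m l)).map Prod.fst := by
  induction l generalizing v m with
  | nil => simp [pvM]
  | cons jp rest ih =>
    obtain ⟨j, p⟩ := jp
    have hMcons : ∀ m' : Int, pvM m' ((j, p) :: rest) = pvM (if p ≤ 21 ∧ m' < p then p else m') rest := by
      intro m'; simp [pvM]
    simp only [List.foldl_cons]
    by_cases h1 : p ≤ 21 ∧ m < p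
    · -- reset branch
      rw [if_pos h1]
      rw [ih [j] p (le_trans h0 (le_of_lt h1.2)) h1.1]
      have ht : pvM m ((j, p) :: rest) = pvM p rest := by rw [hMcons]; simp [h1]
      have hge : p ≤ pvM p rest := pvM_ge rest p
      have hne : pvM p rest ≠ m := by omega
      rw [ht]
      simp only [List.filter_cons, if_neg hne]
      by_cases he : pvM p rest = p
      · simp [he]
      · have hb : ¬ ((p == pvM p rest) = true) := by simp; omega
        simp [if_neg he, hb]
    · rw [if_neg h1]
      have ht : pvM m ((j, p) :: rest) = pvM m rest := by rw [hMcons]; simp [h1]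
      have hge : m ≤ pvM m rest := pvM_ge rest m
      have hle : pvM m rest ≤ 21 := pvM_le21 rest m h21
      by_cases h2 : p = m
      · -- append branch
        rw [if_pos h2]
        rw [ih (v ++ [j]) m h0 h21, ht]
        by_cases he : pvM m rest = m
        · have hb : ((p == pvM m rest) = true) := by simp [he, h2]
          simp [he, h2, List.append_assoc]
        · have hb : ¬ ((p == pvM m rest) = true) := by simp; omega
          simp [he, hb]
      · -- skip branch
        rw [if_neg h2]
        rw [ih v m h0 h21, ht]
        have hne : p ≠ pvM m rest := by
          rcases not_and_or.mp h1 with h | h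
          · omega
          · omega
        have hb : ¬ ((p == pvM m rest) = true) := by simpa using hne
        simp [hb]

-- pvM 0 l is the running max of the valid scores
theorem pvM_eq_foldl_max (l : List (String × Int)) (m : Int) (h0 : 0 ≤ m) :
    pvM m l = ((l.map Prod.snd).filter (fun p => decide (0 < p) && decide (p ≤ 21))).foldl max m := by
  induction l generalizing m with
  | nil => simp [pvM]
  | cons jp rest ih =>
    have hstep : pvM m (jp :: rest) = pvM (if jp.2 ≤ 21 ∧ m < jp.2 then jp.2 else m) rest := by
      simp [pvM]
    rw [hstep, List.map_cons, List.filter_cons]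
    by_cases hv : 0 < jp.2 ∧ jp.2 ≤ 21
    · have hb : ((decide (0 < jp.2) && decide (jp.2 ≤ 21)) = true) := by simp [hv.1, hv.2]
      rw [if_pos hb, List.foldl_cons]
      have hupd : (if jp.2 ≤ 21 ∧ m < jp.2 then jp.2 else m) = max m jp.2 := by
        split_ifs with h <;> omega
      rw [hupd]
      exact ih (max m jp.2) (le_trans h0 (le_max_left m jp.2))
    · have hb : ¬ ((decide (0 < jp.2) && decide (jp.2 ≤ 21)) = true) := by
        simp only [Bool.and_eq_true, decide_eq_true_eq]; exact hv
      rw [if_neg hb]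
      have hupd : (if jp.2 ≤ 21 ∧ m < jp.2 then jp.2 else m) = m := by
        split_ifs with h <;> omega
      rw [hupd]; exact ih m h0

-- B's alvo equals pvM 0 l
theorem alvo_eq_pvM (l : List (String × Int)) :
    (PySem.List.max? ((l.map Prod.snd).filter (fun p => decide (0 < p) && decide (p ≤ 21))) (fun y => y)).getD 0
      = pvM 0 l := by
  rw [pvM_eq_foldl_max l 0 le_rfl]
  cases hv : (l.map Prod.snd).filter (fun p => decide (0 < p) && decide (p ≤ 21)) with
  | nil => simp [PySem.List.max?]
  | cons x t =>
    rw [PySem.List.max?_id_cons]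
    have hx : 0 < x := by
      have : x ∈ (l.map Prod.snd).filter (fun p => decide (0 < p) && decide (p ≤ 21)) := by
        rw [hv]; exact List.mem_cons_self
      have := List.of_mem_filter this
      simp only [Bool.and_eq_true, decide_eq_true_eq] at this
      exact this.1
    simp only [Option.getD_some, List.foldl_cons]
    congr 1
    omega

-- ===== VERDICT (by name: the statement is the Claim_ definition above) =====
theorem verificar_vencedores_spec : Claim_equal_verificar_vencedores := by
  intro pontuacoes _
  unfold Spec_verificar_vencedores verificar_vencedores verificar_vencedores_alt
  simp only []
  rw [pvLoop_char pontuacoes [] 0 le_rfl (by norm_num), alvo_eq_pvM pontuacoes]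
  split_ifs <;> simp
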